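-- pv_equiv track=rewrite | github.com/TheKOG/Spider | spider-baidu-image.py | fuckpps
-- ===== SOURCE A (Python) =====
-- def fuckpps(name):
--     dic1={'_z2C$q': ':','_z&e3B':'.','AzdH3F':'/'}
--     dic2={'w':'a','k':'b','v':'c','1':'d','j':'e','u':'f','2':'g','i':'h',
--         't':'i','3':'j','h':'k','s':'l','4':'m','g':'n','5':'o','r':'p','q':'q','6':'r','f':'s','p':'t','7':'u',
--         'e':'v','o':'w','8':'1','d':'2','n':'3','9':'4','c':'5','m':'6','0':'7','b':'8','l':'9','a':'0'}
--     for key in dic1 :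
--         name=name.replace(key,dic1[key])
--     n=len(name)
--     for i in range(0,n):
--         if name[i] in dic2:
--             name=name[:i]+str(dic2[name[i]])+name[i+1:]
--     return name
-- ===== SOURCE B (Python) =====
-- def fuckpps(name):
--     dic2 = {'w':'a','k':'b','v':'c','1':'d','j':'e','u':'f','2':'g','i':'h',
--         't':'i','3':'j','h':'k','s':'l','4':'m','g':'n','5':'o','r':'p','q':'q','6':'r','f':'s','p':'t','7':'u',
--         'e':'v','o':'w','8':'1','d':'2','n':'3','9':'4','c':'5','m':'6','0':'7','b':'8','l':'9','a':'0'}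
--     out = []
--     i = 0
--     n = len(name)
--     while i < n:
--         if name.startswith('_z2C$q', i):
--             out.append(':')
--             i += 6
--         elif name.startswith('_z&e3B', i):
--             out.append('.')
--             i += 6
--         elif name.startswith('AzdH3F', i):
--             out.append('/')
--             i += 6
--         else:
--             c = name[i]
--             out.append(dic2.get(c, c))
--             i += 1
--     return ''.join(out)
-- ===== Notes on version B (the rewrite author's own statement) =====
-- stated objective: faster
-- what changed: replaces A's three global replace passes plus a per-index loop that rebuilds the whole string for every substituted character by one left-to-right scan that decodes each position once (6-char key lookahead, else a per-char map) into a result list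
import Mathlib
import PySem

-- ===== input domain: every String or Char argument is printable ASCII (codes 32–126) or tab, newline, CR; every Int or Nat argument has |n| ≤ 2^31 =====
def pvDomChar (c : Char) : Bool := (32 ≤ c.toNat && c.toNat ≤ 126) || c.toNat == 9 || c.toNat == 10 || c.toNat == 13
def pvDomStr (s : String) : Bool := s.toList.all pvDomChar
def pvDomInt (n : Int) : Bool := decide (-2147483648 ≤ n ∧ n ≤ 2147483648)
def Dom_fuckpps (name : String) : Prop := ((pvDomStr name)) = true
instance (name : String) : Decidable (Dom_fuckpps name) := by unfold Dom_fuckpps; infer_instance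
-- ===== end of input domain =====

-- B replaces A's three global replace passes plus a per-index loop that rebuilds the string for
-- every substituted character by one left-to-right scan decoding each position once (objective:
-- faster; a timing run measured B faster on large inputs).

-- ===== PORT A =====
def pvDic1 : PySem.Dict String String :=
  PySem.Dict.ofList [("_z2C$q", ":"), ("_z&e3B", "."), ("AzdH3F", "/")]

def pvDic2 : PySem.Dict Char Char :=
  PySem.Dict.ofList [('w','a'),('k','b'),('v','c'),('1','d'),('j','e'),('u','f'),('2','g'),('i','h'),
    ('t','i'),('3','j'),('h','k'),('s','l'),('4','m'),('g','n'),('5','o'),('r','p'),('q','q'),('6','r'),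
    ('f','s'),('p','t'),('7','u'),('e','v'),('o','w'),('8','1'),('d','2'),('n','3'),('9','4'),('c','5'),
    ('m','6'),('0','7'),('b','8'),('l','9'),('a','0')]

-- body of A's index loop: name = name[:i] + str(dic2[name[i]]) + name[i+1:]  (guarded by name[i] in dic2)
def pvStep (nm : String) (i : Int) : String :=
  match PySem.Str.pyGet? nm i with
  | some c =>
    if pvDic2.contains c then
      PySem.Str.slice nm none (some i) ++ String.ofList [pvDic2.getD c c] ++
        PySem.Str.slice nm (some (i + 1)) none
    else nm
  | none => nm

def fuckpps (name : String) : String :=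
  let name1 := pvDic1.keys.foldl (fun nm key => PySem.Str.replace nm key (pvDic1.getD key "")) name
  let n := PySem.Str.len name1
  (PySem.List.pyRange 0 n 1).foldl pvStep name1

-- ===== PORT B =====
def fuckppsGo : List Char → List Char
  | [] => []
  | c :: t =>
    if ("_z2C$q".toList).isPrefixOf (c :: t) then ':' :: fuckppsGo (t.drop 5)
    else if ("_z&e3B".toList).isPrefixOf (c :: t) then '.' :: fuckppsGo (t.drop 5)
    else if ("AzdH3F".toList).isPrefixOf (c :: t) then '/' :: fuckppsGo (t.drop 5)
    else pvDic2.getD c c :: fuckppsGo t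
  termination_by cs => cs.length
  decreasing_by all_goals (simp; try omega)

def fuckpps_alt (name : String) : String := String.ofList (fuckppsGo name.toList)

-- ===== PRECONDITION & SPEC =====
def Spec_fuckpps (name : String) (out : String) : Prop := out = fuckpps_alt name
instance (name : String) (out : String) : Decidable (Spec_fuckpps name out) := by unfold Spec_fuckpps; infer_instance

-- ===== CLAIM (what is proved, stated in full; the proofs are below) =====
def Claim_equal_fuckpps : Prop := ∀ (name : String), Dom_fuckpps name → Spec_fuckpps name (fuckpps name)

-- ===== LEMMAS AND PROOFS =====

-- Structural characterisation of Python's str.replace for a non-empty pattern.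
def pvRep (old nw : List Char) : List Char → List Char
  | [] => []
  | c :: t =>
    if old.isPrefixOf (c :: t) then nw ++ pvRep old nw (t.drop (old.length - 1))
    else c :: pvRep old nw t
  termination_by cs => cs.length
  decreasing_by all_goals (simp; try omega)

theorem pvGo_succ_cons (old nw : List Char) (fuel : Nat) (c : Char) (t acc : List Char) :
    PySem.Chars.replace.go old nw (fuel + 1) (c :: t) acc =
      if old.isPrefixOf (c :: t) then
        PySem.Chars.replace.go old nw fuel (List.drop old.length (c :: t)) (nw.reverse ++ acc)
      else PySem.Chars.replace.go old nw fuel t (c :: acc) := by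
  rw [PySem.Chars.replace.go]

theorem pvGo_eq (old nw : List Char) (hold : old ≠ []) :
    ∀ (fuel : Nat) (l acc : List Char), l.length ≤ fuel →
      PySem.Chars.replace.go old nw fuel l acc = acc.reverse ++ pvRep old nw l := by
  intro fuel
  induction fuel with
  | zero =>
    intro l acc hl
    have hnil : l = [] := by cases l <;> simp_all
    subst hnil
    simp [PySem.Chars.replace.go, pvRep]
  | succ n ih =>
    intro l acc hl
    cases l with
    | nil => simp [PySem.Chars.replace.go, pvRep]
    | cons c t =>
      rw [pvGo_succ_cons, pvRep]
      by_cases hp : old.isPrefixOf (c :: t) = true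
      · rw [if_pos hp, if_pos hp]
        have hlen : (List.drop old.length (c :: t)).length ≤ n := by
          have : 1 ≤ old.length := by cases old <;> simp_all
          simp only [List.length_drop, List.length_cons] at *
          omega
        rw [ih _ _ hlen]
        have hdrop : List.drop old.length (c :: t) = t.drop (old.length - 1) := by
          obtain ⟨o, os, rfl⟩ : ∃ o os, old = o :: os := by
            cases old with | nil => exact absurd rfl hold | cons o os => exact ⟨o, os, rfl⟩
          simp
        rw [hdrop]
        simp
      · rw [if_neg hp, if_neg hp, ih _ _ (by simp at hl ⊢; omega)]
        simp

theorem pvReplace_eq (s old nw : List Char) (hold : old ≠ []) :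
    PySem.Chars.replace s old nw = pvRep old nw s := by
  have he : old.isEmpty = false := by cases old <;> simp_all
  rw [PySem.Chars.replace, he]
  simpa using pvGo_eq old nw hold s.length s [] le_rfl

theorem pvStr_replace_eq (nm key val : String) (hold : key.toList ≠ []) :
    PySem.Str.replace nm key val = String.ofList (pvRep key.toList val.toList nm.toList) := by
  rw [PySem.Str.replace, pvReplace_eq _ _ _ hold]

theorem pvRep_cons_pos {old : List Char} (nw : List Char) {c : Char} {t : List Char}
    (h : old.isPrefixOf (c :: t) = true) :
    pvRep old nw (c :: t) = nw ++ pvRep old nw (t.drop (old.length - 1)) := by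
  rw [pvRep, if_pos h]

theorem pvRep_cons_neg {old : List Char} (nw : List Char) {c : Char} {t : List Char}
    (h : ¬ old.isPrefixOf (c :: t) = true) :
    pvRep old nw (c :: t) = c :: pvRep old nw t := by
  rw [pvRep, if_neg h]

-- replacing by a single char x ∉ p cannot create a new occurrence of p
theorem pvRep_prefix_rev (old : List Char) (x : Char) :
    ∀ s p : List Char, x ∉ p → p <+: pvRep old [x] s → p <+: s := by
  intro s
  induction s using pvRep.induct old with
  | case1 => simp [pvRep]
  | case2 c t hpre ih =>
    intro p hx hp
    rw [pvRep_cons_pos _ hpre] at hp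
    cases p with
    | nil => simp
    | cons q p' =>
      obtain ⟨hq, _⟩ := List.cons_prefix_cons.mp hp
      exact absurd (hq ▸ List.mem_cons_self) hx
  | case3 c t hpre ih =>
    intro p hx hp
    rw [pvRep_cons_neg _ hpre] at hp
    cases p with
    | nil => simp
    | cons q p' =>
      obtain ⟨hq, hp'⟩ := List.cons_prefix_cons.mp hp
      exact List.cons_prefix_cons.mpr ⟨hq, ih p' (fun h => hx (List.mem_cons_of_mem _ h)) hp'⟩

theorem pvRep_not_isPrefixOf (old : List Char) (x : Char) (p : List Char) (hx : x ∉ p)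
    (s : List Char) (h : ¬ p.isPrefixOf s = true) : ¬ p.isPrefixOf (pvRep old [x] s) = true := by
  intro hc
  exact h (List.isPrefixOf_iff_prefix.mpr
    (pvRep_prefix_rev old x s p hx (List.isPrefixOf_iff_prefix.mp hc)))

-- the per-character substitution A's index loop performs
def pvF (c : Char) : Char := if pvDic2.contains c then pvDic2.getD c c else c

theorem pvF_eq_getD (c : Char) : pvF c = pvDic2.getD c c := by
  by_cases h : pvDic2.contains c = true
  · simp [pvF, h]
  · rw [pvF, if_neg h, PySem.Dict.getD_of_not_contains _ _ (by simpa using h)]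

-- skip lemmas: scanning one pattern over a block it cannot match inside
theorem pvSkip_rep2_self (nw r : List Char) :
    pvRep "_z&e3B".toList nw ("_z&e3B".toList ++ r) = nw ++ pvRep "_z&e3B".toList nw r := by
  simp [pvRep, List.isPrefixOf]

theorem pvSkip_rep3_self (nw r : List Char) :
    pvRep "AzdH3F".toList nw ("AzdH3F".toList ++ r) = nw ++ pvRep "AzdH3F".toList nw r := by
  simp [pvRep, List.isPrefixOf]

theorem pvSkip_12 (nw r : List Char) :
    pvRep "_z2C$q".toList nw ("_z&e3B".toList ++ r) = "_z&e3B".toList ++ pvRep "_z2C$q".toList nw r := by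
  simp [pvRep, List.isPrefixOf]

theorem pvSkip_13 (nw r : List Char) :
    pvRep "_z2C$q".toList nw ("AzdH3F".toList ++ r) = "AzdH3F".toList ++ pvRep "_z2C$q".toList nw r := by
  simp [pvRep, List.isPrefixOf]

theorem pvSkip_23 (nw r : List Char) :
    pvRep "_z&e3B".toList nw ("AzdH3F".toList ++ r) = "AzdH3F".toList ++ pvRep "_z&e3B".toList nw r := by
  simp [pvRep, List.isPrefixOf]

theorem pvSkip_head2 (nw : List Char) (c : Char) (hc : c ≠ '_') (X : List Char) :
    pvRep "_z&e3B".toList nw (c :: X) = c :: pvRep "_z&e3B".toList nw X := by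
  apply pvRep_cons_neg
  simp only [List.isPrefixOf_iff_prefix]
  intro h
  exact hc ((List.cons_prefix_cons.mp (by simpa using h)).1.symm)

theorem pvSkip_head3 (nw : List Char) (c : Char) (hc : c ≠ 'A') (X : List Char) :
    pvRep "AzdH3F".toList nw (c :: X) = c :: pvRep "AzdH3F".toList nw X := by
  apply pvRep_cons_neg
  simp only [List.isPrefixOf_iff_prefix]
  intro h
  exact hc ((List.cons_prefix_cons.mp (by simpa using h)).1.symm)

theorem pvGo_cons (c : Char) (t : List Char) :
    fuckppsGo (c :: t) =
      if ("_z2C$q".toList).isPrefixOf (c :: t) then ':' :: fuckppsGo (t.drop 5)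
      else if ("_z&e3B".toList).isPrefixOf (c :: t) then '.' :: fuckppsGo (t.drop 5)
      else if ("AzdH3F".toList).isPrefixOf (c :: t) then '/' :: fuckppsGo (t.drop 5)
      else pvDic2.getD c c :: fuckppsGo t := by
  rw [fuckppsGo.eq_def]

-- the composition of the three replaces followed by the per-char map IS B's one-pass scan
theorem pvMain (cs : List Char) :
    (pvRep "AzdH3F".toList ['/'] (pvRep "_z&e3B".toList ['.']
      (pvRep "_z2C$q".toList [':'] cs))).map pvF = fuckppsGo cs := by
  induction cs using fuckppsGo.induct with
  | case1 => simp [pvRep, fuckppsGo]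
  | case2 c t hpre ih =>
    rw [pvRep_cons_pos _ hpre, show ("_z2C$q".toList).length - 1 = 5 from by decide]
    simp only [List.singleton_append]
    rw [pvSkip_head2 _ ':' (by decide), pvSkip_head3 _ ':' (by decide), List.map_cons, ih]
    rw [pvGo_cons, if_pos hpre, show pvF ':' = ':' from by decide]
  | case3 c t h1 hpre ih =>
    obtain ⟨r, hr⟩ := List.isPrefixOf_iff_prefix.mp hpre
    obtain ⟨rfl, rfl⟩ : c = '_' ∧ t = 'z' :: '&' :: 'e' :: '3' :: 'B' :: r := by
      simpa using hr.symm
    simp only [List.drop_succ_cons, List.drop_zero] at ih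
    rw [pvGo_cons, if_neg h1, if_pos hpre]
    simp only [List.drop_succ_cons, List.drop_zero]
    conv_lhs => rw [show ('_' :: 'z' :: '&' :: 'e' :: '3' :: 'B' :: r) = "_z&e3B".toList ++ r from by simp]
    rw [pvSkip_12, pvSkip_rep2_self]
    simp only [List.singleton_append]
    rw [pvSkip_head3 _ '.' (by decide), List.map_cons, ih, show pvF '.' = '.' from by decide]
  | case4 c t h1 h2 hpre ih =>
    obtain ⟨r, hr⟩ := List.isPrefixOf_iff_prefix.mp hpre
    obtain ⟨rfl, rfl⟩ : c = 'A' ∧ t = 'z' :: 'd' :: 'H' :: '3' :: 'F' :: r := by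
      simpa using hr.symm
    simp only [List.drop_succ_cons, List.drop_zero] at ih
    rw [pvGo_cons, if_neg h1, if_neg h2, if_pos hpre]
    simp only [List.drop_succ_cons, List.drop_zero]
    conv_lhs => rw [show ('A' :: 'z' :: 'd' :: 'H' :: '3' :: 'F' :: r) = "AzdH3F".toList ++ r from by simp]
    rw [pvSkip_13, pvSkip_23, pvSkip_rep3_self]
    simp only [List.singleton_append]
    rw [List.map_cons, ih, show pvF '/' = '/' from by decide]
  | case5 c t h1 h2 h3 ih =>
    have e1 : pvRep "_z2C$q".toList [':'] (c :: t) = c :: pvRep "_z2C$q".toList [':'] t :=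
      pvRep_cons_neg _ h1
    have n2 : ¬ ("_z&e3B".toList).isPrefixOf (c :: pvRep "_z2C$q".toList [':'] t) = true := by
      have h := pvRep_not_isPrefixOf "_z2C$q".toList ':' "_z&e3B".toList (by decide) (c :: t) h2
      rwa [e1] at h
    have e2 : pvRep "_z&e3B".toList ['.'] (c :: pvRep "_z2C$q".toList [':'] t) =
        c :: pvRep "_z&e3B".toList ['.'] (pvRep "_z2C$q".toList [':'] t) :=
      pvRep_cons_neg _ n2
    have n3 : ¬ ("AzdH3F".toList).isPrefixOf
        (c :: pvRep "_z&e3B".toList ['.'] (pvRep "_z2C$q".toList [':'] t)) = true := by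
      have h := pvRep_not_isPrefixOf "_z&e3B".toList '.' "AzdH3F".toList (by decide) _
        (pvRep_not_isPrefixOf "_z2C$q".toList ':' "AzdH3F".toList (by decide) (c :: t) h3)
      rwa [e1, e2] at h
    rw [e1, e2, pvRep_cons_neg _ n3, List.map_cons, ih]
    rw [pvGo_cons, if_neg h1, if_neg h2, if_neg h3, pvF_eq_getD]

theorem pvStr_ext {u v : String} (h : u.toList = v.toList) : u = v := by
  have := congrArg String.ofList h
  simpa using this

theorem pvStep_eq (cs : List Char) (k : Nat) (hk : k < cs.length) :
    pvStep (String.ofList ((cs.take k).map pvF ++ cs.drop k)) (k : Int) =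
      String.ofList ((cs.take (k + 1)).map pvF ++ cs.drop (k + 1)) := by
  have htl : (String.ofList ((cs.take k).map pvF ++ cs.drop k)).toList
      = (cs.take k).map pvF ++ cs.drop k := by simp
  have hplen : ((cs.take k).map pvF).length = k := by
    simp [List.length_take, Nat.min_eq_left hk.le]
  have hdrop : cs.drop k = cs[k] :: cs.drop (k + 1) := List.drop_eq_getElem_cons hk
  have hget : PySem.Str.pyGet? (String.ofList ((cs.take k).map pvF ++ cs.drop k)) (k : Int)
      = some cs[k] := by
    rw [PySem.Str.pyGet?_natCast, htl, hdrop]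
    rw [List.getElem?_append_right (by omega)]
    rw [hplen]
    simp [List.getElem?_eq_getElem hk]
  have htake : (cs.take (k + 1)).map pvF = (cs.take k).map pvF ++ [pvF cs[k]] := by
    rw [List.take_add_one, List.getElem?_eq_getElem hk]
    simp only [Option.toList_some, List.map_append, List.map_cons, List.map_nil]
  simp only [pvStep, hget]
  by_cases hc : pvDic2.contains cs[k] = true
  · rw [if_pos hc]
    apply pvStr_ext
    have hf : pvF cs[k] = pvDic2.getD cs[k] cs[k] := pvF_eq_getD cs[k]
    simp only [String.toList_append, PySem.Str.toList_slice, PySem.Chars.slice_eq_listSlice, htl]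
    rw [PySem.List.slice_to_natCast, show ((k : Int) + 1) = ((k + 1 : Nat) : Int) from by push_cast; ring,
      PySem.List.slice_from_natCast]
    rw [hdrop]
    rw [List.take_append_of_le_length (by rw [hplen]), List.take_of_length_le (by omega)]
    rw [List.drop_append]
    have hmin : min k cs.length = k := Nat.min_eq_left hk.le
    simp [htake, hf, hmin, List.drop_eq_nil_of_le]
  · rw [if_neg hc]
    apply pvStr_ext
    rw [htl, htake, hdrop]
    have hf : pvF cs[k] = cs[k] := by rw [pvF, if_neg hc]
    simp [hf]

theorem pvLoop (cs : List Char) : ∀ (m k : Nat), cs.length - k = m → k ≤ cs.length →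
    (PySem.List.pyRange (k : Int) ((cs.length : Int)) 1).foldl pvStep
      (String.ofList ((cs.take k).map pvF ++ cs.drop k)) = String.ofList (cs.map pvF) := by
  intro m
  induction m with
  | zero =>
    intro k h hk
    have hke : k = cs.length := by omega
    subst hke
    rw [PySem.List.pyRange_one_eq_nil le_rfl]
    simp [List.take_of_length_le le_rfl]
  | succ n ihm =>
    intro k h hk
    have hklt : k < cs.length := by omega
    rw [PySem.List.pyRange_one_cons (by exact_mod_cast hklt), List.foldl_cons, pvStep_eq cs k hklt]
    have := ihm (k + 1) (by omega) (by omega)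
    rw [show (((k + 1 : Nat)) : Int) = (k : Int) + 1 from by push_cast; ring] at this
    exact this

-- ===== VERDICT (by name: the statement is the Claim_ definition above) =====
theorem fuckpps_spec : Claim_equal_fuckpps := by
  unfold Claim_equal_fuckpps Spec_fuckpps
  intro name _
  rw [fuckpps, fuckpps_alt]
  rw [show pvDic1.keys = ["_z2C$q", "_z&e3B", "AzdH3F"] from rfl]
  simp only [List.foldl_cons, List.foldl_nil]
  rw [show pvDic1.getD "_z2C$q" "" = ":" from rfl,
      show pvDic1.getD "_z&e3B" "" = "." from rfl,
      show pvDic1.getD "AzdH3F" "" = "/" from rfl]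
  rw [pvStr_replace_eq _ _ _ (by decide), pvStr_replace_eq _ _ _ (by decide),
      pvStr_replace_eq _ _ _ (by decide)]
  simp only [String.toList_ofList]
  set cs3 := pvRep "AzdH3F".toList ("/".toList)
      (pvRep "_z&e3B".toList (".".toList) (pvRep "_z2C$q".toList (":".toList) name.toList)) with hcs3
  have hlen : PySem.Str.len (String.ofList cs3) = (cs3.length : Int) := by
    simp [PySem.Str.len]
  rw [hlen]
  have h0 := pvLoop cs3 cs3.length 0 (by omega) (by omega)
  simp only [Nat.cast_zero, List.take_zero, List.map_nil, List.nil_append, List.drop_zero] at h0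
  rw [h0, hcs3]
  rw [show (":".toList) = [':'] from rfl, show (".".toList) = ['.'] from rfl,
      show ("/".toList) = ['/'] from rfl]
  rw [pvMain]
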